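-- pv_equiv track=rewrite | github.com/akshay-greenlang/Code-V1_GreenLang | packs/eu-compliance/PACK-018-eu-green-claims-prep/workflows/remediation_planning_workflow.py | _count_external_services
-- ===== SOURCE A (Python) =====
-- from enum import Enum
-- from typing import Any, Dict, List, Optional
--
-- class TriageCategory(str, Enum):
--     """Triage category for non-compliant claims."""
--     WITHDRAW = "withdraw"
--     REWORD = "reword"
--     SUBSTANTIATE = "substantiate"
--     REPLACE = "replace"
--
-- def _count_external_services(triage_data: Dict[str, Any]) -> Dict[str, int]:
--     """Count external service requirements from triage data."""
--     substantiate_count = sum(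
--         1 for c in triage_data.get("triaged_claims", [])
--         if c["triage_category"] == TriageCategory.SUBSTANTIATE.value
--     )
--     replace_count = sum(
--         1 for c in triage_data.get("triaged_claims", [])
--         if c["triage_category"] == TriageCategory.REPLACE.value
--     )
--     return {
--         "lca_providers_needed": substantiate_count,
--         "verifiers_needed": substantiate_count,
--         "certification_bodies_needed": replace_count,
--     }
-- ===== SOURCE B (Python) =====
-- from enum import Enum
-- from typing import Any, Dict
--
-- class TriageCategory(str, Enum):
--     """Triage category for non-compliant claims."""
--     WITHDRAW = "withdraw"
--     REWORD = "reword"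
--     SUBSTANTIATE = "substantiate"
--     REPLACE = "replace"
--
-- # Contribution of one claim of each category to the three OUTPUT fields
-- # (lca_providers_needed, verifiers_needed, certification_bodies_needed):
-- # a 'substantiate' claim needs an LCA provider and a verifier; a 'replace'
-- # claim needs a certification body; other categories need nothing.
-- _CONTRIB = {
--     TriageCategory.SUBSTANTIATE.value: (1, 1, 0),
--     TriageCategory.REPLACE.value: (0, 0, 1),
-- }
--
-- def _count_external_services(triage_data: Dict[str, Any]) -> Dict[str, int]:
--     """Count external service requirements from triage data."""
--     lca = ver = cert = 0
--     for c in triage_data.get("triaged_claims", []):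
--         dl, dv, dc = _CONTRIB.get(c["triage_category"], (0, 0, 0))
--         lca += dl
--         ver += dv
--         cert += dc
--     return {
--         "lca_providers_needed": lca,
--         "verifiers_needed": ver,
--         "certification_bodies_needed": cert,
--     }
-- ===== Notes on version B (the rewrite author's own statement) =====
-- stated objective: alternative
-- what changed: B never computes per-category counts: each claim is mapped through a fixed contribution table straight to its (lca, verifier, cert-body) contribution vector, and one pass sums these vectors into the three output fields, replacing A's two category-specific scans.
import Mathlib
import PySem

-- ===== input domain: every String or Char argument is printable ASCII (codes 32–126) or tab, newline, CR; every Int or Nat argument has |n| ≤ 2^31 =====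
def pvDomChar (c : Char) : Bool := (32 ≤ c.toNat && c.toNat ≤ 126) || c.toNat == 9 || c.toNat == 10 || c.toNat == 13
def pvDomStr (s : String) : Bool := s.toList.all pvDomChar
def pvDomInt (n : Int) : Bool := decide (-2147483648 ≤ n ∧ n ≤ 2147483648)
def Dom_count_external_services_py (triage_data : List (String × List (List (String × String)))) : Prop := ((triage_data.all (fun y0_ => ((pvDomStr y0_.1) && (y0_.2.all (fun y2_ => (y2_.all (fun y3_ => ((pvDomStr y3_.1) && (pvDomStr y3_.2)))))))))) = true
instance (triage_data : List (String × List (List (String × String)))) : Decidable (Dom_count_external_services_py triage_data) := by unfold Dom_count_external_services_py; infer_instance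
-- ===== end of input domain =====

-- B maps each claim through a fixed contribution table straight to the three output counters in one pass, instead of A's two category-specific scans (return value only).


-- ===== PORT A =====
def count_external_services_py (triage_data : List (String × List (List (String × String)))) : List (String × Int) :=
  let claims := (PySem.Dict.mk triage_data).getD "triaged_claims" []
  let substantiate_count : Int :=
    (claims.map (fun c => if (PySem.Dict.mk c).get? "triage_category" == some "substantiate" then (1 : Int) else 0)).sum
  let replace_count : Int :=
    (claims.map (fun c => if (PySem.Dict.mk c).get? "triage_category" == some "replace" then (1 : Int) else 0)).sum
  [("lca_providers_needed", substantiate_count),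
   ("verifiers_needed", substantiate_count),
   ("certification_bodies_needed", replace_count)]

-- ===== PORT B =====
-- fixed contribution table: category → (Δlca, Δverifiers, Δcert_bodies)
def pvContrib : PySem.Dict String (Int × Int × Int) :=
  PySem.Dict.mk [("substantiate", (1, 1, 0)), ("replace", (0, 0, 1))]

def count_external_services_py_alt (triage_data : List (String × List (List (String × String)))) : List (String × Int) :=
  let claims := (PySem.Dict.mk triage_data).getD "triaged_claims" []
  let st : Int × Int × Int :=
    claims.foldl (fun s c =>
      let d := pvContrib.getD ((PySem.Dict.mk c).getD "triage_category" "") (0, 0, 0)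
      (s.1 + d.1, s.2.1 + d.2.1, s.2.2 + d.2.2)) (0, 0, 0)
  [("lca_providers_needed", st.1),
   ("verifiers_needed", st.2.1),
   ("certification_bodies_needed", st.2.2)]

-- ===== PRECONDITION & SPEC =====
-- Pre_ excludes inputs where some claim dict lacks the key "triage_category": Python A (and B) raise KeyError there.
def Pre_count_external_services_py (triage_data : List (String × List (List (String × String)))) : Prop :=
  ∀ c ∈ (PySem.Dict.mk triage_data).getD "triaged_claims" [],
    (PySem.Dict.mk c).contains "triage_category" = true
instance (triage_data : List (String × List (List (String × String)))) : Decidable (Pre_count_external_services_py triage_data) := by unfold Pre_count_external_services_py; infer_instance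
def pvWitness_count_external_services_py : (List (String × List (List (String × String)))) :=
  [("triaged_claims", [[("triage_category", "substantiate")], [("triage_category", "withdraw")]])]
def Spec_count_external_services_py (triage_data : List (String × List (List (String × String)))) (out : List (String × Int)) : Prop := out = count_external_services_py_alt triage_data
instance (triage_data : List (String × List (List (String × String)))) (out : List (String × Int)) : Decidable (Spec_count_external_services_py triage_data out) := by unfold Spec_count_external_services_py; infer_instance

-- ===== CLAIM (what is proved, stated in full; the proofs are below) =====
def Claim_equal_count_external_services_py : Prop := ∀ (triage_data : List (String × List (List (String × String)))), Dom_count_external_services_py triage_data → Pre_count_external_services_py triage_data → Spec_count_external_services_py triage_data (count_external_services_py triage_data)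

-- ===== LEMMAS AND PROOFS =====
-- Each claim's contribution vector is (A's substantiate-indicator, same, A's replace-indicator).
lemma contrib_parts (cl : List (String × String)) :
    pvContrib.getD ((PySem.Dict.mk cl).getD "triage_category" "") (0, 0, 0)
      = ((if (PySem.Dict.mk cl).get? "triage_category" == some "substantiate" then (1 : Int) else 0),
         (if (PySem.Dict.mk cl).get? "triage_category" == some "substantiate" then (1 : Int) else 0),
         (if (PySem.Dict.mk cl).get? "triage_category" == some "replace" then (1 : Int) else 0)) := by
  cases hx : (PySem.Dict.mk cl).get? "triage_category" with
  | none =>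
      simp only [PySem.Dict.getD, hx, Option.getD_none]
      decide
  | some x =>
      simp only [PySem.Dict.getD, hx, Option.getD_some]
      by_cases hs : x = "substantiate"
      · subst hs; decide
      · by_cases hr : x = "replace"
        · subst hr; decide
        · have h1 : ("substantiate" == x) = false := by
            simp; exact fun h => hs h.symm
          have h2 : ("replace" == x) = false := by
            simp; exact fun h => hr h.symm
          have hs' : (some x == some "substantiate") = false := by
            simp; exact hs
          have hr' : (some x == some "replace") = false := by
            simp; exact hr
          simp [pvContrib, PySem.Dict.get?, h1, h2, hs', hr']

-- B's vector fold, started at any accumulator, adds exactly A's two 0/1-sums componentwise.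
lemma fold_contrib_eq (claims : List (List (String × String))) :
    ∀ (s : Int × Int × Int),
    claims.foldl (fun s cl =>
      let d := pvContrib.getD ((PySem.Dict.mk cl).getD "triage_category" "") (0, 0, 0)
      (s.1 + d.1, s.2.1 + d.2.1, s.2.2 + d.2.2)) s
    = (s.1 + (claims.map (fun cl => if (PySem.Dict.mk cl).get? "triage_category" == some "substantiate" then (1 : Int) else 0)).sum,
       s.2.1 + (claims.map (fun cl => if (PySem.Dict.mk cl).get? "triage_category" == some "substantiate" then (1 : Int) else 0)).sum,
       s.2.2 + (claims.map (fun cl => if (PySem.Dict.mk cl).get? "triage_category" == some "replace" then (1 : Int) else 0)).sum) := by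
  induction claims with
  | nil => intro s; simp
  | cons cl rest ih =>
    intro s
    rw [List.foldl_cons, ih]
    simp only [contrib_parts, List.map_cons, List.sum_cons]
    refine Prod.ext ?_ (Prod.ext ?_ ?_) <;> simp <;> ring

-- ===== VERDICT (by name: the statement is the Claim_ definition above) =====
theorem count_external_services_py_spec : Claim_equal_count_external_services_py := by
  intro td _ _
  unfold Spec_count_external_services_py count_external_services_py count_external_services_py_alt
  simp only [fold_contrib_eq, zero_add]
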